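-- pv_equiv track=rewrite | github.com/Pranjal9999999/AutomatedUserStudyPortal | IntelligentTranscript.py | combine_transcripts
-- ===== SOURCE A (Python) =====
-- def combine_transcripts(speech_transcript, facial_transcript):
--     # Combine the two transcripts into one list and sort by timestamp.
--     combined_transcript = sorted(speech_transcript + facial_transcript, key=lambda x: x[1])
--
--     # Initialize an empty string to hold the final transcript.
--     final_transcript = ""
--
--     # Iterate over the combined transcript.
--     for i in range(len(combined_transcript)):
--         # Add the text or facial expression to the final transcript.
--         final_transcript += combined_transcript[i][0]
--
--         # If this is not the last item in the transcript, add a time marker.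
--         if i < len(combined_transcript) - 1:
--             final_transcript += f" ({combined_transcript[i][1]} - {combined_transcript[i+1][1]})\n"
--         else:
--             final_transcript += f" ({combined_transcript[i][1]} - end)\n"
--
--     return final_transcript
-- ===== SOURCE B (Python) =====
-- def combine_transcripts(speech_transcript, facial_transcript):
--     # Build the output back-to-front: walk the sorted list in reverse,
--     # threading the successor's time marker (initially "end") through the pass.
--     result = ""
--     nxt = "end"
--     for item in reversed(sorted(speech_transcript + facial_transcript, key=lambda x: x[1])):
--         result = f"{item[0]} ({item[1]} - {nxt})\n" + result
--         nxt = str(item[1])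
--     return result
-- ===== Notes on version B (the rewrite author's own statement) =====
-- stated objective: alternative
-- what changed: Replaces the forward indexed loop with i/i+1 lookups and += by a single reversed pass that builds the output back-to-front while threading the successor time marker (initially "end") as loop state, so no indexing or shifted list is needed.
import Mathlib
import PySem

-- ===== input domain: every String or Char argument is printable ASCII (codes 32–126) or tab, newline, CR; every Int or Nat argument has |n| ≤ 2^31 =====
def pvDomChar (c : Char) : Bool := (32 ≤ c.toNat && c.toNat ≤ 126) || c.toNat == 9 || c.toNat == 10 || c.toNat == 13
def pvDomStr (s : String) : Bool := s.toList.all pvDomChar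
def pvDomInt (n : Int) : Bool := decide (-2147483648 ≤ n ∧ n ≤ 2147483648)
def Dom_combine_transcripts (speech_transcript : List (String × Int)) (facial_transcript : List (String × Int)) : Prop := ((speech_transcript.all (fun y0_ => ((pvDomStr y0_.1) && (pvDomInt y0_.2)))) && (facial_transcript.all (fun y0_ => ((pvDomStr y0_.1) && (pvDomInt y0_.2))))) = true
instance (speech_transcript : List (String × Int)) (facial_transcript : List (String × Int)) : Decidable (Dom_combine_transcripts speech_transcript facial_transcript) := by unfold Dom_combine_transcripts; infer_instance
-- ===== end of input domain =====

-- B builds the output back-to-front in one reversed pass that threads the successor time marker, instead of A's forward indexed loop with i/i+1 lookups (objective: alternative decomposition).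


-- ===== PORT A =====
def combine_transcripts (speech_transcript : List (String × Int)) (facial_transcript : List (String × Int)) : String :=
  let combined := PySem.List.sorted (speech_transcript ++ facial_transcript) (fun x => x.2)
  (PySem.List.pyRange 0 (combined.length : Int) 1).foldl
    (fun acc i =>
      let acc1 := acc ++ (PySem.List.pyGetD combined i ("", 0)).1
      if i < (combined.length : Int) - 1 then
        acc1 ++ " (" ++ PySem.Int.toStr (PySem.List.pyGetD combined i ("", 0)).2 ++ " - "
             ++ PySem.Int.toStr (PySem.List.pyGetD combined (i + 1) ("", 0)).2 ++ ")\n"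
      else
        acc1 ++ " (" ++ PySem.Int.toStr (PySem.List.pyGetD combined i ("", 0)).2 ++ " - end)\n")
    ""

-- ===== PORT B =====
-- reversed pass: state = (result built so far, successor time marker), starting from ("", "end")
def combine_transcripts_alt (speech_transcript : List (String × Int)) (facial_transcript : List (String × Int)) : String :=
  ((PySem.List.sorted (speech_transcript ++ facial_transcript) (fun x => x.2)).reverse.foldl
    (fun (st : String × String) item =>
      (item.1 ++ " (" ++ PySem.Int.toStr item.2 ++ " - " ++ st.2 ++ ")\n" ++ st.1,
       PySem.Int.toStr item.2))
    ("", "end")).1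

-- ===== PRECONDITION & SPEC =====
def Spec_combine_transcripts (speech_transcript : List (String × Int)) (facial_transcript : List (String × Int)) (out : String) : Prop := out = combine_transcripts_alt speech_transcript facial_transcript
instance (speech_transcript : List (String × Int)) (facial_transcript : List (String × Int)) (out : String) : Decidable (Spec_combine_transcripts speech_transcript facial_transcript out) := by unfold Spec_combine_transcripts; infer_instance

-- ===== CLAIM (what is proved, stated in full; the proofs are below) =====
def Claim_equal_combine_transcripts : Prop := ∀ (speech_transcript : List (String × Int)) (facial_transcript : List (String × Int)), Dom_combine_transcripts speech_transcript facial_transcript → Spec_combine_transcripts speech_transcript facial_transcript (combine_transcripts speech_transcript facial_transcript)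

-- ===== LEMMAS AND PROOFS =====

-- one output line with an explicit successor string
def pvLine (x : String × Int) (nxt : String) : String :=
  x.1 ++ " (" ++ PySem.Int.toStr x.2 ++ " - " ++ nxt ++ ")\n"

-- the common characterisation of both ports on the sorted list
def pvG : List (String × Int) → String
  | [] => ""
  | [x] => x.1 ++ " (" ++ PySem.Int.toStr x.2 ++ " - end)\n"
  | x :: y :: t => pvLine x (PySem.Int.toStr y.2) ++ pvG (y :: t)

-- the successor marker carried by B's pass when applied to the list after c's head
def pvNxt : List (String × Int) → String
  | [] => "end"
  | x :: _ => PySem.Int.toStr x.2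

theorem pv_B_char (c : List (String × Int)) :
    c.reverse.foldl
      (fun (st : String × String) item =>
        (item.1 ++ " (" ++ PySem.Int.toStr item.2 ++ " - " ++ st.2 ++ ")\n" ++ st.1,
         PySem.Int.toStr item.2))
      ("", "end") = (pvG c, pvNxt c) := by
  rw [List.foldl_reverse]
  induction c with
  | nil => simp [pvG, pvNxt]
  | cons x t ih =>
    rw [List.foldr_cons, ih]
    cases t with
    | nil => simp [pvG, pvNxt, String.append_assoc]
    | cons y ys => simp [pvG, pvNxt, pvLine, String.append_assoc]

theorem pv_A_char (xs : List (String × Int)) :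
    ∀ (n k : Nat) (acc : String), xs.length - k = n →
    (PySem.List.pyRange (k : Int) (xs.length : Int) 1).foldl
      (fun acc i =>
        let acc1 := acc ++ (PySem.List.pyGetD xs i ("", 0)).1
        if i < (xs.length : Int) - 1 then
          acc1 ++ " (" ++ PySem.Int.toStr (PySem.List.pyGetD xs i ("", 0)).2 ++ " - "
               ++ PySem.Int.toStr (PySem.List.pyGetD xs (i + 1) ("", 0)).2 ++ ")\n"
        else
          acc1 ++ " (" ++ PySem.Int.toStr (PySem.List.pyGetD xs i ("", 0)).2 ++ " - end)\n")
      acc = acc ++ pvG (xs.drop k) := by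
  intro n
  induction n with
  | zero =>
    intro k acc h
    have hk : xs.length ≤ k := by omega
    rw [PySem.List.pyRange_one_eq_nil (by exact_mod_cast hk)]
    simp [List.drop_eq_nil_of_le hk, pvG]
  | succ n ih =>
    intro k acc h
    have hk : k < xs.length := by omega
    rw [PySem.List.pyRange_one_cons (by exact_mod_cast hk)]
    rw [List.foldl_cons]
    rw [show ((k : Int) + 1) = (((k + 1 : Nat)) : Int) by omega]
    rw [show xs.drop k = xs[k] :: xs.drop (k + 1) from List.drop_eq_getElem_cons hk]
    by_cases hlast : k + 1 < xs.length
    · have hcond : ((k : Nat) : Int) < (xs.length : Int) - 1 := by omega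
      rw [ih (k + 1) _ (by omega)]
      simp only [hcond, if_pos, PySem.List.pyGetD_natCast,
        List.getD_eq_getElem _ _ hk, List.getD_eq_getElem _ _ hlast]
      rw [show xs.drop (k + 1) = xs[k + 1] :: xs.drop (k + 2) from List.drop_eq_getElem_cons hlast]
      simp [pvG, pvLine, String.append_assoc]
    · have hlen : k + 1 = xs.length := by omega
      have hcond : ¬ (((k : Nat) : Int) < (xs.length : Int) - 1) := by omega
      rw [PySem.List.pyRange_one_eq_nil (by exact_mod_cast Nat.le_of_eq hlen.symm)]
      simp only [List.foldl_nil, hcond, PySem.List.pyGetD_natCast,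
        List.getD_eq_getElem _ _ hk]
      rw [show xs.drop (k + 1) = [] from List.drop_eq_nil_of_le (by omega)]
      simp [pvG, String.append_assoc]

-- ===== VERDICT (by name: the statement is the Claim_ definition above) =====
theorem combine_transcripts_spec : Claim_equal_combine_transcripts := by
  intro s f _
  unfold Spec_combine_transcripts combine_transcripts combine_transcripts_alt
  rw [pv_B_char]
  have := pv_A_char (PySem.List.sorted (s ++ f) (fun x => x.2))
    (PySem.List.sorted (s ++ f) (fun x => x.2)).length 0 "" (by omega)
  simpa using this
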